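-- pv_equiv track=rewrite | github.com/mi790kle/misha-s-homework-python-17-dict | ex3.py | merging_dicts
-- ===== SOURCE A (Python) =====
-- def merging_dicts(dict1, dict2) -> dict:
--     dict3 = {}
--     for key, value in dict1.items():
--         if key in dict2:
--             if len(value) > len(dict2[key]):
--                 dict3[key] = value
--             elif len(value) == len(dict2[key]):
--                 dict3[key] = value
--             else:
--                 dict3[key] = dict2[key]
--         else:
--             dict3[key] = value
--     for key, value in dict2.items():
--         if key in dict3:
--             continue
--         else:
--             dict3[key] = value
--     return dict3
-- ===== SOURCE B (Python) =====
-- def merging_dicts(dict1, dict2) -> dict: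
--     merged = {}
--     for key, value in list(dict1.items()) + list(dict2.items()):
--         if key not in merged or len(value) > len(merged[key]):
--             merged[key] = value
--     return merged
-- ===== Notes on version B (the rewrite author's own statement) =====
-- stated objective: alternative
-- what changed: A builds the result in two loops (a three-way length comparison over dict1, then a fill-in pass over dict2); B runs one uniform keep-the-longer fold over the concatenated item streams of both dicts, with no per-key three-way branch and no membership test against dict1.
import Mathlib
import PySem

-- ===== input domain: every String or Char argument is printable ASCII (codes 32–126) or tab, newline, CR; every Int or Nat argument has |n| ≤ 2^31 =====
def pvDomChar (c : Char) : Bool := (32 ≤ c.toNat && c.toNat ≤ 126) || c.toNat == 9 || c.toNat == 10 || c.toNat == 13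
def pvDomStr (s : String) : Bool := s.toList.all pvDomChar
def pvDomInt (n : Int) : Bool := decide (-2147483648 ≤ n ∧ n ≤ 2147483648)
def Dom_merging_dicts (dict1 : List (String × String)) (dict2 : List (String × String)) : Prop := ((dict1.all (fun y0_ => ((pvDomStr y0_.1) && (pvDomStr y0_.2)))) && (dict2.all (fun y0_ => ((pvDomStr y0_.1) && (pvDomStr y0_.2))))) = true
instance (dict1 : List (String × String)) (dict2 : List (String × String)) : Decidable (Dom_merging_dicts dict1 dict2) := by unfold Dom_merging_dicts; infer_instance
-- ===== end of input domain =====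

-- B replaces A's two loops (three-way length branch over dict1, then a fill-in pass over dict2)
-- by one uniform keep-the-longer fold over the concatenated item streams of both dicts.

-- ===== PORT A =====
def merging_dicts (dict1 : List (String × String)) (dict2 : List (String × String)) : List (String × String) :=
  let d2 : PySem.Dict String String := PySem.Dict.mk dict2
  let d3 : PySem.Dict String String :=
    dict1.foldl (fun d3 kv =>
      match d2.get? kv.1 with              -- 'if key in dict2' / 'dict2[key]'
      | some w =>
        if PySem.Str.len kv.2 > PySem.Str.len w then d3.insert kv.1 kv.2
        else if PySem.Str.len kv.2 = PySem.Str.len w then d3.insert kv.1 kv.2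
        else d3.insert kv.1 w
      | none => d3.insert kv.1 kv.2) PySem.Dict.empty
  let d3 :=
    dict2.foldl (fun d3 kv =>
      if d3.contains kv.1 then d3 else d3.insert kv.1 kv.2) d3
  d3.items

-- ===== PORT B =====
def merging_dicts_alt (dict1 : List (String × String)) (dict2 : List (String × String)) : List (String × String) :=
  ((dict1 ++ dict2).foldl (fun m kv =>
      match m.get? kv.1 with               -- 'if key not in merged or len(value) > len(merged[key])'
      | none => m.insert kv.1 kv.2
      | some w => if PySem.Str.len kv.2 > PySem.Str.len w then m.insert kv.1 kv.2 else m)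
    (PySem.Dict.empty : PySem.Dict String String)).items

-- ===== PRECONDITION & SPEC =====
-- Pre_ excludes association lists with duplicate keys: they do not represent a Python dict
-- (Python collapses duplicates before the call), so the ports' reading of them is accidental.
def Pre_merging_dicts (dict1 : List (String × String)) (dict2 : List (String × String)) : Prop :=
  (dict1.map Prod.fst).Nodup ∧ (dict2.map Prod.fst).Nodup
instance (dict1 : List (String × String)) (dict2 : List (String × String)) : Decidable (Pre_merging_dicts dict1 dict2) := by unfold Pre_merging_dicts; infer_instance

def pvWitness_merging_dicts : (List (String × String)) × (List (String × String)) :=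
  ([("a", "xx"), ("b", "y")], [("b", "zzz"), ("c", "w")])

def Spec_merging_dicts (dict1 : List (String × String)) (dict2 : List (String × String)) (out : List (String × String)) : Prop := out = merging_dicts_alt dict1 dict2
instance (dict1 : List (String × String)) (dict2 : List (String × String)) (out : List (String × String)) : Decidable (Spec_merging_dicts dict1 dict2 out) := by unfold Spec_merging_dicts; infer_instance

-- ===== CLAIM (what is proved, stated in full; the proofs are below) =====
def Claim_equal_merging_dicts : Prop := ∀ (dict1 : List (String × String)) (dict2 : List (String × String)), Dom_merging_dicts dict1 dict2 → Pre_merging_dicts dict1 dict2 → Spec_merging_dicts dict1 dict2 (merging_dicts dict1 dict2)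

-- ===== LEMMAS AND PROOFS =====

-- The value A keeps for a dict1 entry p, and the value B's fold ends with for it.
def pvUpd (l : List (String × String)) (p : String × String) : String × String :=
  match (PySem.Dict.mk l).get? p.1 with
  | some w => if PySem.Str.len w > PySem.Str.len p.2 then (p.1, w) else p
  | none => p

-- B's fold step
def pvStepB (m : PySem.Dict String String) (kv : String × String) : PySem.Dict String String :=
  match m.get? kv.1 with
  | none => m.insert kv.1 kv.2
  | some w => if PySem.Str.len kv.2 > PySem.Str.len w then m.insert kv.1 kv.2 else m

-- Characterisation of B's fold over a duplicate-free item stream l from any duplicate-free state m: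
-- existing entries get updated to the longer value, new keys are appended.
theorem pvFoldB_items (l : List (String × String)) (m : PySem.Dict String String)
    (hl : (l.map Prod.fst).Nodup) (hm : m.keys.Nodup) :
    (l.foldl pvStepB m).items
      = m.items.map (pvUpd l) ++ l.filter (fun kv => !(m.contains kv.1)) := by
  induction l generalizing m with
  | nil =>
    have hid : List.map (pvUpd []) m.items = m.items := by
      rw [List.map_congr_left (fun p _ => (rfl : pvUpd [] p = p))]
      exact List.map_id' m.items
    simp [hid]
  | cons kv rest ih =>
    obtain ⟨k0, v0⟩ := kv
    simp only [List.map_cons, List.nodup_cons, List.mem_map] at hl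
    obtain ⟨hk, hrest⟩ := hl
    have hk' : k0 ∉ rest.map Prod.fst := by simpa using hk
    have hkrest : (PySem.Dict.mk rest).get? k0 = none := by
      rw [PySem.Dict.get?_eq_none_iff_not_mem_keys]
      simpa [PySem.Dict.keys] using hk'
    rw [List.foldl_cons]
    cases h : m.get? k0 with
    | none =>
      have hcont : m.contains k0 = false := by
        rw [PySem.Dict.contains_eq_isSome_get?, h]; rfl
      have hstep : pvStepB m (k0, v0) = m.insert k0 v0 := by simp [pvStepB, h]
      rw [hstep, ih _ hrest ?_]
      · rw [PySem.Dict.items_insert_of_not_contains _ _ hcont]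
        have h1 : (m.items ++ [(k0, v0)]).map (pvUpd rest)
            = m.items.map (pvUpd ((k0, v0) :: rest)) ++ [(k0, v0)] := by
          rw [List.map_append]
          congr 1
          · apply List.map_congr_left
            intro p hp
            have hne : k0 ≠ p.1 := by
              intro he
              have hc : m.contains p.1 = true := by
                rw [PySem.Dict.contains_iff_mem_keys]
                exact PySem.Dict.mem_keys_of_mem_items _ hp
              rw [← he, hcont] at hc; exact Bool.false_ne_true hc
            unfold pvUpd
            rw [PySem.Dict.get?_mk_cons]
            simp [hne]
          · unfold pvUpd
            simp [hkrest]
        have h2 : rest.filter (fun q => !((m.insert k0 v0).contains q.1))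
            = rest.filter (fun q => !(m.contains q.1)) := by
          apply List.filter_congr
          intro q hq
          have hne : q.1 ≠ k0 := fun he => hk' (by simpa [← he] using List.mem_map_of_mem (f := Prod.fst) hq)
          simp [PySem.Dict.contains_insert, hne]
        rw [h1, h2, List.filter_cons]
        simp [hcont]
      · rw [PySem.Dict.keys_insert_of_not_contains _ _ hcont]
        refine List.Nodup.append hm (List.nodup_singleton _) ?_
        intro x hx hx'
        simp at hx'
        subst hx'
        rw [← PySem.Dict.contains_iff_mem_keys, hcont] at hx
        exact Bool.false_ne_true hx
    | some w0 =>
      have hlenN : PySem.Str.len v0 > PySem.Str.len w0 ↔ w0.length < v0.length := by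
        simp [PySem.Str.len_eq]
      have hcont : m.contains k0 = true := by
        rw [PySem.Dict.contains_eq_isSome_get?, h]; rfl
      have hval : ∀ p ∈ m.items, p.1 = k0 → p.2 = w0 := by
        rintro ⟨pk, pv⟩ hp he
        simp only at he ⊢
        subst he
        have hg := PySem.Dict.get?_of_mem_items m hp hm
        rw [h] at hg
        exact (Option.some.injEq _ _ ▸ hg : w0 = pv).symm
      have hmapeq : ∀ (m' : PySem.Dict String String),
          m'.items = m.items.map (fun p => if p.1 == k0 then
            (if PySem.Str.len v0 > PySem.Str.len w0 then (k0, v0) else p) else p) →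
          m'.items.map (pvUpd rest) = m.items.map (pvUpd ((k0, v0) :: rest)) := by
        intro m' hm'
        rw [hm', List.map_map]
        apply List.map_congr_left
        intro p hp
        simp only [Function.comp]
        by_cases he : p.1 = k0
        · have hp2 : p.2 = w0 := hval p hp he
          simp only [he, beq_self_eq_true, if_true]
          by_cases hlen : PySem.Str.len v0 > PySem.Str.len w0
          · simp only [hlen, if_true]
            unfold pvUpd
            rw [PySem.Dict.get?_mk_cons, hkrest]
            simp only [beq_self_eq_true, if_true, he, hp2]
            have hpe : p = (k0, w0) := Prod.ext he hp2
            rw [hpe]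
            simp [PySem.Str.len_eq] at hlen ⊢
            omega
          · simp only [hlen, if_false]
            unfold pvUpd
            rw [PySem.Dict.get?_mk_cons, he, hkrest]
            have hpe : p = (k0, w0) := Prod.ext he hp2
            rw [hpe]
            simp only [beq_self_eq_true, if_true]
            simp [PySem.Str.len_eq] at hlen ⊢
            omega
        · have hne : k0 ≠ p.1 := fun a => he a.symm
          simp only [beq_iff_eq, he, if_false]
          unfold pvUpd
          rw [PySem.Dict.get?_mk_cons]
          simp [hne]
      have hfilt : ∀ (m' : PySem.Dict String String), m'.keys = m.keys →
          rest.filter (fun q => !(m'.contains q.1)) = rest.filter (fun q => !(m.contains q.1)) := by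
        intro m' hkeys
        apply List.filter_congr
        intro q hq
        rw [PySem.Dict.contains_eq_decide_mem_keys, PySem.Dict.contains_eq_decide_mem_keys, hkeys]
      by_cases hlen : PySem.Str.len v0 > PySem.Str.len w0
      · have hlen' : w0.length < v0.length := hlenN.mp hlen
        have hstep : pvStepB m (k0, v0) = m.insert k0 v0 := by simp [pvStepB, h, hlen']
        rw [hstep, ih _ hrest ?_]
        · have h1 := hmapeq (m.insert k0 v0) (by
            rw [PySem.Dict.items_insert_of_contains _ _ hcont]
            apply List.map_congr_left
            intro p hp
            by_cases he : p.1 = k0 <;> simp [he, hlen'])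
          rw [h1, hfilt _ (PySem.Dict.keys_insert_of_contains _ _ hcont), List.filter_cons]
          simp [hcont]
        · rw [PySem.Dict.keys_insert_of_contains _ _ hcont]; exact hm
      · have hlen' : ¬ w0.length < v0.length := fun hc => hlen (hlenN.mpr hc)
        have hstep : pvStepB m (k0, v0) = m := by simp [pvStepB, h, hlen']
        rw [hstep, ih _ hrest hm]
        have hid2 : ∀ p ∈ m.items,
            (if (p.1 == k0) = true then
              if PySem.Str.len v0 > PySem.Str.len w0 then (k0, v0) else p else p) = id p := by
          intro p hp
          by_cases he : p.1 = k0 <;> simp [he, hlen']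
        have h1 := hmapeq m (by symm; rw [List.map_congr_left hid2, List.map_id])
        rw [h1, List.filter_cons]
        simp [hcont]

-- A's second loop: fill in dict2 keys that are not present yet.
def pvStepA2 (d : PySem.Dict String String) (kv : String × String) : PySem.Dict String String :=
  if d.contains kv.1 then d else d.insert kv.1 kv.2

theorem pvFoldA2_items (l : List (String × String)) (d : PySem.Dict String String)
    (hl : (l.map Prod.fst).Nodup) :
    (l.foldl pvStepA2 d).items = d.items ++ l.filter (fun kv => !(d.contains kv.1)) := by
  induction l generalizing d with
  | nil => simp
  | cons kv rest ih =>
    simp only [List.map_cons, List.nodup_cons, List.mem_map] at hl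
    obtain ⟨hk, hrest⟩ := hl
    rw [List.foldl_cons]
    by_cases hcont : d.contains kv.1 = true
    · rw [show pvStepA2 d kv = d by simp [pvStepA2, hcont], ih _ hrest, List.filter_cons]
      simp [hcont]
    · simp only [Bool.not_eq_true] at hcont
      rw [show pvStepA2 d kv = d.insert kv.1 kv.2 by simp [pvStepA2, hcont], ih _ hrest,
        PySem.Dict.items_insert_of_not_contains _ _ hcont, List.filter_cons]
      have h2 : rest.filter (fun q => !((d.insert kv.1 kv.2).contains q.1))
          = rest.filter (fun q => !(d.contains q.1)) := by
        apply List.filter_congr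
        intro q hq
        have hne : q.1 ≠ kv.1 := fun he => hk ⟨q, hq, he⟩
        simp [PySem.Dict.contains_insert, hne]
      rw [h2]
      simp [hcont]

theorem merging_dicts_spec : Claim_equal_merging_dicts := by
  intro dict1 dict2 _ hpre
  obtain ⟨h1, h2⟩ := hpre
  unfold Spec_merging_dicts merging_dicts merging_dicts_alt
  show (List.foldl (fun d3 kv => if d3.contains kv.1 then d3 else d3.insert kv.1 kv.2)
      (List.foldl (fun d3 kv =>
        match (PySem.Dict.mk dict2).get? kv.1 with
        | some w =>
          if PySem.Str.len kv.2 > PySem.Str.len w then d3.insert kv.1 kv.2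
          else if PySem.Str.len kv.2 = PySem.Str.len w then d3.insert kv.1 kv.2
          else d3.insert kv.1 w
        | none => d3.insert kv.1 kv.2) PySem.Dict.empty dict1) dict2).items = _
  -- B side
  rw [show (fun (m : PySem.Dict String String) (kv : String × String) =>
      match m.get? kv.1 with
      | none => m.insert kv.1 kv.2
      | some w => if PySem.Str.len kv.2 > PySem.Str.len w then m.insert kv.1 kv.2 else m)
      = pvStepB from rfl, List.foldl_append]
  have hm1 : dict1.foldl pvStepB PySem.Dict.empty = PySem.Dict.mk dict1 := by
    apply PySem.Dict.ext
    rw [pvFoldB_items dict1 PySem.Dict.empty h1 (by simp [PySem.Dict.keys_empty])]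
    show (PySem.Dict.empty : PySem.Dict String String).items.map (pvUpd dict1) ++ _ = _
    rw [show (PySem.Dict.empty : PySem.Dict String String).items = [] from rfl]
    simp [PySem.Dict.contains_empty]
  rw [hm1, pvFoldB_items dict2 (PySem.Dict.mk dict1) h2 (by simpa [PySem.Dict.keys] using h1)]
  -- A side
  have hA1 : dict1.foldl (fun d3 kv =>
      match (PySem.Dict.mk dict2).get? kv.1 with
      | some w =>
        if PySem.Str.len kv.2 > PySem.Str.len w then d3.insert kv.1 kv.2
        else if PySem.Str.len kv.2 = PySem.Str.len w then d3.insert kv.1 kv.2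
        else d3.insert kv.1 w
      | none => d3.insert kv.1 kv.2) PySem.Dict.empty
      = dict1.foldl (fun d3 kv => d3.insert kv.1 (pvUpd dict2 kv).2) PySem.Dict.empty := by
    apply PySem.List.foldl_congr_mem
    intro acc kv _
    unfold pvUpd
    cases hg : (PySem.Dict.mk dict2).get? kv.1 with
    | none => simp
    | some w =>
      simp only
      by_cases hlt : kv.2.length < w.length
      · simp [PySem.Str.len_eq, hlt, show ¬ w.length < kv.2.length from by omega,
          show kv.2.length ≠ w.length from by omega]
      · by_cases heq : kv.2.length = w.length
        · simp [PySem.Str.len_eq, heq]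
        · simp [PySem.Str.len_eq, hlt, show w.length < kv.2.length from by omega]
  rw [hA1]
  have hfst : ∀ kv : String × String, (pvUpd dict2 kv).1 = kv.1 := by
    intro kv
    unfold pvUpd
    cases hg : (PySem.Dict.mk dict2).get? kv.1 with
    | none => rfl
    | some w => simp only; split <;> rfl
  have hA1items : (dict1.foldl (fun d3 kv => d3.insert kv.1 (pvUpd dict2 kv).2)
      PySem.Dict.empty).items = dict1.map (pvUpd dict2) := by
    rw [PySem.Dict.items_foldl_insert_fresh _ _ _ _ (by simp) h1]
    rw [show (PySem.Dict.empty : PySem.Dict String String).items = [] from rfl, List.nil_append]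
    apply List.map_congr_left
    intro kv _
    rw [show ((kv.1, (pvUpd dict2 kv).2) : String × String)
      = ((pvUpd dict2 kv).1, (pvUpd dict2 kv).2) by rw [hfst]]
  rw [show (fun (d3 : PySem.Dict String String) (kv : String × String) =>
      if d3.contains kv.1 then d3 else d3.insert kv.1 kv.2) = pvStepA2 from rfl,
    pvFoldA2_items dict2 _ h2, hA1items]
  congr 1
  apply List.filter_congr
  intro q _
  have : (dict1.foldl (fun d3 kv => d3.insert kv.1 (pvUpd dict2 kv).2)
      PySem.Dict.empty).keys = dict1.map Prod.fst := by
    rw [PySem.Dict.keys, hA1items, List.map_map]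
    apply List.map_congr_left
    intro kv _
    exact hfst kv
  rw [PySem.Dict.contains_eq_decide_mem_keys, PySem.Dict.contains_eq_decide_mem_keys, this]
  simp [PySem.Dict.keys]
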